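-- pv_equiv track=rewrite | github.com/pranavraikote/ffu-analyzer | backend/main.py | reorder_chunks
-- ===== SOURCE A (Python) =====
-- def reorder_chunks(chunks):
--     if len(chunks) <= 2:
--         return chunks
--     result, lo, hi = [None] * len(chunks), 0, len(chunks) - 1
--     for i, chunk in enumerate(chunks):
--         if i % 2 == 0:
--             result[lo] = chunk; lo += 1
--         else:
--             result[hi] = chunk; hi -= 1
--     return result
-- ===== SOURCE B (Python) =====
-- def reorder_chunks(chunks):
--     if len(chunks) <= 2:
--         return chunks
--     evens = chunks[::2]
--     odds = chunks[1::2]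
--     return evens + odds[::-1]
-- ===== Notes on version B (the rewrite author's own statement) =====
-- stated objective: simpler
-- what changed: Replaced A's preallocated array filled by an interleaved two-pointer (lo/hi) enumeration with three slice passes: evens = chunks[::2], odds = chunks[1::2], result = evens + odds[::-1].
import Mathlib
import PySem

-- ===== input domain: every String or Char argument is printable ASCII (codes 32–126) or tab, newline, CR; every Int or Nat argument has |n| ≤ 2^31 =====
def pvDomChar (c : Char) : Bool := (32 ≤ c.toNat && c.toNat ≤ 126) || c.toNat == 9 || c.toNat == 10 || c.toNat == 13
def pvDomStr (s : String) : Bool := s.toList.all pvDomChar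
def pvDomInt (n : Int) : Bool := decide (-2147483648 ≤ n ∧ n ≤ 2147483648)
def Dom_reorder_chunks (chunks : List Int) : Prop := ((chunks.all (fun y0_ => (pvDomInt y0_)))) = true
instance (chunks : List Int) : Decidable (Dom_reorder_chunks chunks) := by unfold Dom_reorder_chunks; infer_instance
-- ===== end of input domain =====

-- B replaces A's interleaved two-pointer fill of a preallocated list with three slice passes
-- (evens, odds, reversed odds); same O(n) cost, simpler decomposition. Proved equal on all inputs.

-- ===== PORT A =====
-- Python's `[None] * n` placeholder list is modeled as `List.replicate n 0`: every slot is
-- overwritten before the list is returned, so the placeholder value is never observable.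
-- lo/hi are kept as Nat: in Python they stay ≥ 0 throughout the loop (hi ends at ⌈n/2⌉-1 ≥ 0).
def reorder_chunks (chunks : List Int) : List Int :=
  if chunks.length ≤ 2 then chunks
  else
    (((PySem.List.enumerate chunks 0).foldl
        (fun (st : List Int × Nat × Nat) (p : Int × Int) =>
          if p.1 % 2 == 0 then (st.1.set st.2.1 p.2, st.2.1 + 1, st.2.2)
          else (st.1.set st.2.2 p.2, st.2.1, st.2.2 - 1))
        (List.replicate chunks.length 0, 0, chunks.length - 1))).1

-- ===== PORT B =====
-- chunks[::2], chunks[1::2], odds[::-1] are ported with PySem.List.slice?; the step literals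
-- 2 and -1 are nonzero, so slice? always returns `some` here and the `.getD []` default is dead.
def reorder_chunks_alt (chunks : List Int) : List Int :=
  if chunks.length ≤ 2 then chunks
  else
    let evens := (PySem.List.slice? chunks none none 2).getD []
    let odds := (PySem.List.slice? chunks (some 1) none 2).getD []
    evens ++ (PySem.List.slice? odds none none (-1)).getD []

-- ===== PRECONDITION & SPEC =====
def Spec_reorder_chunks (chunks : List Int) (out : List Int) : Prop := out = reorder_chunks_alt chunks
instance (chunks : List Int) (out : List Int) : Decidable (Spec_reorder_chunks chunks out) := by unfold Spec_reorder_chunks; infer_instance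

-- ===== CLAIM (what is proved, stated in full; the proofs are below) =====
def Claim_equal_reorder_chunks : Prop := ∀ (chunks : List Int), Dom_reorder_chunks chunks → Spec_reorder_chunks chunks (reorder_chunks chunks)

-- ===== LEMMAS AND PROOFS =====

-- elements at even positions 0,2,4,… of a list
def pvEvens : List Int → List Int
  | [] => []
  | [a] => [a]
  | a :: _ :: t => a :: pvEvens t

theorem pvEvens_cons (a : Int) (t : List Int) : pvEvens (a :: t) = a :: pvEvens t.tail := by
  cases t <;> simp [pvEvens]

-- B side: the step-2 slices and the reverse slice, characterised via pvEvens
theorem filterMap_range_even (xs : List Int) :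
    (List.range ((xs.length + 1) / 2)).filterMap (fun k => xs[2 * k]?) = pvEvens xs := by
  induction xs using pvEvens.induct with
  | case1 => simp [pvEvens]
  | case2 a => simp [pvEvens]
  | case3 a b t ih =>
    have hlen : (t.length + 2 + 1) / 2 = (t.length + 1) / 2 + 1 := by omega
    simp only [List.length_cons, hlen, List.range_succ_eq_map, List.filterMap_cons,
      List.filterMap_map]
    simp only [Nat.mul_zero, List.getElem?_cons_zero, Function.comp]
    have hk : ∀ k : Nat, (a :: b :: t)[2 * (k + 1)]? = t[2 * k]? := by
      intro k
      have h2 : 2 * (k + 1) = 2 * k + 1 + 1 := by omega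
      rw [h2, List.getElem?_cons_succ, List.getElem?_cons_succ]
    simp only [hk]
    simp [pvEvens, ih]

theorem filterMap_range_odd (xs : List Int) :
    (List.range (xs.length / 2)).filterMap (fun k => xs[1 + 2 * k]?) = pvEvens xs.tail := by
  cases xs with
  | nil => simp [pvEvens]
  | cons a t =>
    have hk : ∀ k : Nat, (a :: t)[1 + 2 * k]? = t[2 * k]? := by
      intro k
      have h2 : 1 + 2 * k = 2 * k + 1 := by omega
      rw [h2, List.getElem?_cons_succ]
    simp only [List.length_cons, List.tail_cons, hk]
    exact filterMap_range_even t

theorem slice2_even (xs : List Int) :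
    (PySem.List.slice? xs none none 2).getD [] = pvEvens xs := by
  unfold PySem.List.slice? PySem.List.sliceIndices
  norm_num
  have hc : (if 0 < xs.length then (((xs.length : Int) + 2 - 1) / 2).toNat else 0)
      = (xs.length + 1) / 2 := by split <;> omega
  rw [hc, show (fun x : Nat => xs[(2 * (x : Int)).toNat]?) = (fun k : Nat => xs[2 * k]?) from
    funext fun k => by rw [show ((2 * (k : Int)).toNat) = 2 * k by omega]]
  exact filterMap_range_even xs

theorem slice2_odd (xs : List Int) (h : 1 ≤ xs.length) :
    (PySem.List.slice? xs (some 1) none 2).getD [] = pvEvens xs.tail := by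
  unfold PySem.List.slice? PySem.List.sliceIndices
  norm_num
  have hmin : min 1 (xs.length : Int) = 1 := by omega
  rw [hmin]
  have hc : (if 1 < xs.length then (((xs.length : Int) - 1 + 2 - 1) / 2).toNat else 0)
      = xs.length / 2 := by split <;> omega
  rw [hc, show (fun x : Nat => xs[((1 : Int) + 2 * (x : Int)).toNat]?)
      = (fun k : Nat => xs[1 + 2 * k]?) from
    funext fun k => by rw [show (((1 : Int) + 2 * (k : Int)).toNat) = 1 + 2 * k by omega]]
  exact filterMap_range_odd xs

theorem alt_eq (chunks : List Int) (h : ¬ chunks.length ≤ 2) :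
    reorder_chunks_alt chunks = pvEvens chunks ++ (pvEvens chunks.tail).reverse := by
  unfold reorder_chunks_alt
  rw [if_neg h]
  simp only [PySem.List.slice?_none_none_neg_one, Option.getD_some,
    slice2_even, slice2_odd chunks (by omega)]

-- A side: invariant of the lo/hi fill loop.  State = pre ++ mid ++ post with lo = |pre|,
-- hi = |pre| + |mid| - 1; after folding the enumeration from index s, the mid region becomes
-- evens-then-reversed-odds of the remaining elements (swapped when s is odd).
theorem fill_inv (l : List Int) : ∀ (pre mid post : List Int) (s : Int), 0 ≤ s →
    mid.length = l.length →
    ∃ lo hi,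
      (PySem.List.enumerate l s).foldl
        (fun (st : List Int × Nat × Nat) (p : Int × Int) =>
          if p.1 % 2 == 0 then (st.1.set st.2.1 p.2, st.2.1 + 1, st.2.2)
          else (st.1.set st.2.2 p.2, st.2.1, st.2.2 - 1))
        (pre ++ mid ++ post, pre.length, pre.length + mid.length - 1)
      = (pre ++ (if s % 2 = 0 then pvEvens l ++ (pvEvens l.tail).reverse
                 else pvEvens l.tail ++ (pvEvens l).reverse) ++ post, lo, hi) := by
  induction l with
  | nil =>
    intro pre mid post s hs hm
    refine ⟨pre.length, pre.length + mid.length - 1, ?_⟩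
    have : mid = [] := List.eq_nil_of_length_eq_zero (by simpa using hm)
    subst this
    simp [PySem.List.enumerate, pvEvens]
  | cons a t ih =>
    intro pre mid post s hs hm
    rw [PySem.List.enumerate_cons, List.foldl_cons]
    by_cases hpar : s % 2 = 0
    · -- even index: a goes to the front (position lo = |pre|)
      obtain ⟨m0, mr, rfl⟩ : ∃ m0 mr, mid = m0 :: mr := by
        cases mid with
        | nil => simp at hm
        | cons m0 mr => exact ⟨m0, mr, rfl⟩
      have hset : (pre ++ (m0 :: mr) ++ post).set pre.length a
          = (pre ++ [a]) ++ mr ++ post := by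
        rw [List.append_assoc, List.set_append_right _ _ (le_refl pre.length)]
        simp
      have hstep : (if s % 2 == 0 then
            ((pre ++ (m0 :: mr) ++ post).set pre.length a, pre.length + 1,
              pre.length + (m0 :: mr).length - 1)
          else ((pre ++ (m0 :: mr) ++ post).set (pre.length + (m0 :: mr).length - 1) a,
              pre.length, pre.length + (m0 :: mr).length - 1 - 1))
          = ((pre ++ [a]) ++ mr ++ post, (pre ++ [a]).length,
              (pre ++ [a]).length + mr.length - 1) := by
        rw [if_pos (by simpa using hpar), hset]
        simp
      simp only [hstep]
      obtain ⟨lo, hi, hres⟩ := ih (pre ++ [a]) mr post (s + 1) (by omega)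
        (by simpa using hm)
      refine ⟨lo, hi, ?_⟩
      rw [hres]
      have hodd : ¬ (s + 1) % 2 = 0 := by omega
      rw [if_neg hodd, if_pos hpar]
      simp [pvEvens_cons, List.append_assoc]
    · -- odd index: a goes to the back (position hi = |pre| + |mid| - 1)
      have hmne : mid ≠ [] := by
        intro h; subst h; simp at hm
      obtain ⟨mi, m, rfl⟩ : ∃ mi m, mid = mi ++ [m] := ⟨mid.dropLast, mid.getLast hmne,
        (List.dropLast_append_getLast hmne).symm⟩
      have hset : (pre ++ (mi ++ [m]) ++ post).set (pre.length + (mi ++ [m]).length - 1) a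
          = pre ++ mi ++ ([a] ++ post) := by
        have h1 : pre.length + (mi ++ [m]).length - 1 = (pre ++ mi).length := by
          simp
        rw [h1, show pre ++ (mi ++ [m]) ++ post = (pre ++ mi) ++ ([m] ++ post) by
          simp [List.append_assoc]]
        rw [List.set_append_right _ _ (le_refl (pre ++ mi).length)]
        simp [List.append_assoc]
      have hstep : (if s % 2 == 0 then
            ((pre ++ (mi ++ [m]) ++ post).set pre.length a, pre.length + 1,
              pre.length + (mi ++ [m]).length - 1)
          else ((pre ++ (mi ++ [m]) ++ post).set (pre.length + (mi ++ [m]).length - 1) a,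
              pre.length, pre.length + (mi ++ [m]).length - 1 - 1))
          = (pre ++ mi ++ ([a] ++ post), pre.length, pre.length + mi.length - 1) := by
        rw [if_neg (by simpa using hpar), hset]
        simp
      simp only [hstep]
      obtain ⟨lo, hi, hres⟩ := ih pre mi ([a] ++ post) (s + 1) (by omega)
        (by simp at hm; omega)
      refine ⟨lo, hi, ?_⟩
      rw [hres]
      have heven : (s + 1) % 2 = 0 := by omega
      rw [if_pos heven, if_neg hpar]
      rw [pvEvens_cons]
      simp [List.append_assoc]

theorem a_eq (chunks : List Int) (h : ¬ chunks.length ≤ 2) :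
    reorder_chunks chunks = pvEvens chunks ++ (pvEvens chunks.tail).reverse := by
  unfold reorder_chunks
  rw [if_neg h]
  obtain ⟨lo, hi, hres⟩ := fill_inv chunks [] (List.replicate chunks.length 0) [] 0
    (le_refl 0) (by simp)
  have h0 : ([] : List Int) ++ List.replicate chunks.length 0 ++ [] =
      List.replicate chunks.length 0 := by simp
  have h1 : ([] : List Int).length = 0 := rfl
  rw [h0, h1] at hres
  have h2 : (0 : Nat) + (List.replicate chunks.length (0 : Int)).length - 1
      = chunks.length - 1 := by simp
  rw [h2] at hres
  rw [hres]
  simp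

-- ===== VERDICT (by name: the statement is the Claim_ definition above) =====
theorem reorder_chunks_spec : Claim_equal_reorder_chunks := by
  intro chunks _
  unfold Spec_reorder_chunks
  by_cases h : chunks.length ≤ 2
  · unfold reorder_chunks reorder_chunks_alt
    rw [if_pos h, if_pos h]
  · rw [a_eq chunks h, alt_eq chunks h]
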